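-- pv_equiv track=rewrite | github.com/seraveist/MJKK-Web | src/mahjong_core.py | check_kokushi
-- ===== SOURCE A (Python) =====
-- def check_kokushi(tile_counts: list) -> bool:
--     yao_indices = [1, 9, 11, 19, 21, 29, 31, 32, 33, 34, 35, 36, 37]
--     found_yao = 0
--     pair_found = False
--     for idx in yao_indices:
--         if tile_counts[idx] == 1: found_yao += 1
--         elif tile_counts[idx] == 2:
--             found_yao += 1
--             pair_found = True
--         else: return False
--     return found_yao == 13 and pair_found
-- ===== SOURCE B (Python) =====
-- def check_kokushi(tile_counts: list) -> bool:
--     yao_indices = [1, 9, 11, 19, 21, 29, 31, 32, 33, 34, 35, 36, 37]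
--     if len(tile_counts) < 38:
--         return False
--     yao_counts = [tile_counts[i] for i in yao_indices]
--     return min(yao_counts) >= 1 and max(yao_counts) == 2
-- ===== Notes on version B (the rewrite author's own statement) =====
-- stated objective: alternative
-- what changed: Replaces A's flag-and-counter loop with early return by a length guard plus an extremal-value characterization: collect the 13 yao counts and test min >= 1 and max == 2.
import Mathlib
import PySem

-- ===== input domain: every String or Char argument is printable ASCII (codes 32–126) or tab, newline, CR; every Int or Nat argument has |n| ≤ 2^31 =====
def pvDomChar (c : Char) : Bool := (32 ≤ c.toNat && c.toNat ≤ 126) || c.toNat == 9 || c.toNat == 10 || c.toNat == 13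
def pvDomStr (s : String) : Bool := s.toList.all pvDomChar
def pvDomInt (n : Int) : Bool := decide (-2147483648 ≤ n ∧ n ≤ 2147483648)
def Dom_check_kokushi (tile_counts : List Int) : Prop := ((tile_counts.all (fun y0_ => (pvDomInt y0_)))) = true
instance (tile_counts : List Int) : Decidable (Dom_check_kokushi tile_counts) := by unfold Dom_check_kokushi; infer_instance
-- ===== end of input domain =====

-- B replaces A's flag-and-counter loop (with early return) by a length guard plus
-- an extremal-value characterization: collect the 13 yao counts, test min >= 1 and max == 2.

-- ===== PORT A =====
def yaoIndicesA : List Nat := [1, 9, 11, 19, 21, 29, 31, 32, 33, 34, 35, 36, 37]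

-- A's loop: counter found_yao, flag pair_found, early 'return False'.
-- pyGet? = none is Python's IndexError (excluded by Pre_); the port returns false there.
def kokushiLoop (tile_counts : List Int) (idxs : List Nat) (found : Int) (pair : Bool) : Bool :=
  match idxs with
  | [] => found == 13 && pair
  | i :: rest =>
    match PySem.List.pyGet? tile_counts (Int.ofNat i) with
    | none => false
    | some v =>
      if v = 1 then kokushiLoop tile_counts rest (found + 1) pair
      else if v = 2 then kokushiLoop tile_counts rest (found + 1) true
      else false

def check_kokushi (tile_counts : List Int) : Bool :=
  kokushiLoop tile_counts yaoIndicesA 0 false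

-- ===== PORT B =====
def yaoIndicesB : List Nat := [1, 9, 11, 19, 21, 29, 31, 32, 33, 34, 35, 36, 37]

-- Source B: length guard, then min/max over the list of yao counts (guard ensures all
-- indexing is in range, so tile_counts[i] is List.getD here — exact).
def check_kokushi_alt (tile_counts : List Int) : Bool :=
  if tile_counts.length < 38 then false
  else
    let yao_counts := yaoIndicesB.map (fun i => tile_counts.getD i 0)
    match PySem.List.min? yao_counts (fun x => x), PySem.List.max? yao_counts (fun x => x) with
    | some mn, some mx => decide (1 ≤ mn) && mx == 2
    | _, _ => false

-- ===== PRECONDITION & SPEC =====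
-- Pre_ excludes exactly the inputs on which Python A raises IndexError:
-- lists shorter than 38 whose in-range yao entries are all 1 or 2, so the loop
-- reaches an out-of-range yao index before any early 'return False'.
def Pre_check_kokushi (tile_counts : List Int) : Prop :=
  38 ≤ tile_counts.length ∨
  ∃ j < 13, (List.getD [1, 9, 11, 19, 21, 29, 31, 32, 33, 34, 35, 36, 37] j 0) < tile_counts.length ∧
    tile_counts.getD (List.getD [1, 9, 11, 19, 21, 29, 31, 32, 33, 34, 35, 36, 37] j 0) 0 ≠ 1 ∧
    tile_counts.getD (List.getD [1, 9, 11, 19, 21, 29, 31, 32, 33, 34, 35, 36, 37] j 0) 0 ≠ 2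
instance (tile_counts : List Int) : Decidable (Pre_check_kokushi tile_counts) := by
  unfold Pre_check_kokushi; infer_instance

def pvWitness_check_kokushi : List Int := [0, 0]

def Spec_check_kokushi (tile_counts : List Int) (out : Bool) : Prop := out = check_kokushi_alt tile_counts
instance (tile_counts : List Int) (out : Bool) : Decidable (Spec_check_kokushi tile_counts out) := by unfold Spec_check_kokushi; infer_instance

-- ===== CLAIM (what is proved, stated in full; the proofs are below) =====
def Claim_equal_check_kokushi : Prop := ∀ (tile_counts : List Int), Dom_check_kokushi tile_counts → Pre_check_kokushi tile_counts → Spec_check_kokushi tile_counts (check_kokushi tile_counts)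

-- ===== LEMMAS AND PROOFS =====

-- A's loop, on any index list, equals: all entries in {1,2}, counter reaches 13, and a 2 was seen.
lemma kokushiLoop_eq (cs : List Int) (idxs : List Nat) (f : Int) (p : Bool) :
    kokushiLoop cs idxs f p =
      ((idxs.all fun i =>
          match PySem.List.pyGet? cs (Int.ofNat i) with
          | some v => v == 1 || v == 2
          | none => false)
        && (f + idxs.length == 13)
        && (p || idxs.any fun i => PySem.List.pyGet? cs (Int.ofNat i) == some 2)) := by
  induction idxs generalizing f p with
  | nil => simp [kokushiLoop]
  | cons i rest ih =>
    simp only [kokushiLoop, List.all_cons, List.any_cons, List.length_cons]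
    cases h : PySem.List.pyGet? cs (Int.ofNat i) with
    | none => simp
    | some v =>
      by_cases h1 : v = 1
      · subst h1
        rw [ih]
        have e : f + 1 + (rest.length : Int) = f + ((rest.length : Int) + 1) := by ring
        simp [e]
      · by_cases h2 : v = 2
        · subst h2
          rw [ih, ih]
          have e : f + 1 + (rest.length : Int) = f + ((rest.length : Int) + 1) := by ring
          simp [e]
        · simp [h1, h2]

lemma getElem?_eq_some_getD (cs : List Int) (i : Nat) (h : i < cs.length) :
    cs[i]? = some (cs.getD i 0) := by
  rw [List.getElem?_eq_getElem h, List.getD_eq_getElem _ _ h]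

lemma all_congr' {a : Type} (l : List a) (p q : a -> Bool) (h : forall x, x ∈ l -> p x = q x) :
    l.all p = l.all q := by
  induction l with
  | nil => rfl
  | cons y t ih =>
    simp only [List.all_cons, h y (by simp), ih (fun x hx => h x (by simp [hx]))]

lemma any_congr' {a : Type} (l : List a) (p q : a -> Bool) (h : forall x, x ∈ l -> p x = q x) :
    l.any p = l.any q := by
  induction l with
  | nil => rfl
  | cons y t ih =>
    simp only [List.any_cons, h y (by simp), ih (fun x hx => h x (by simp [hx]))]

-- all-in-{1,2} plus exists-2 over a nonempty list equals the min/max characterization.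
lemma kokushi_minmax (v : Int) (t : List Int) :
    (((v :: t).all fun x => x == 1 || x == 2) && ((v :: t).any fun x => x == 2))
    = (match PySem.List.min? (v :: t) (fun x => x), PySem.List.max? (v :: t) (fun x => x) with
       | some mn, some mx => decide (1 ≤ mn) && mx == 2
       | _, _ => false) := by
  rcases hmin : PySem.List.min? (v :: t) (fun x => x) with _ | m
  · simp [PySem.List.min?_eq_none_iff] at hmin
  rcases hmax : PySem.List.max? (v :: t) (fun x => x) with _ | M
  · simp [PySem.List.max?_eq_none_iff] at hmax
  have hmmem := PySem.List.min?_mem hmin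
  have hMmem := PySem.List.max?_mem hmax
  have hlb := PySem.List.min?_isMin hmin
  have hub := PySem.List.max?_isMax hmax
  rw [Bool.eq_iff_iff]
  simp only [Bool.and_eq_true, List.all_eq_true, List.any_eq_true, Bool.or_eq_true,
    beq_iff_eq, decide_eq_true_eq]
  constructor
  · rintro ⟨hall, x, hx, hx2⟩
    constructor
    · rcases hall m hmmem with h | h <;> omega
    · have h1 := hub x hx
      rcases hall M hMmem with h | h <;> omega
  · rintro ⟨h1, h2⟩
    refine ⟨fun x hx => ?_, M, hMmem, h2⟩
    have ha := hlb x hx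
    have hb := hub x hx
    omega

-- ===== VERDICT (by name: the statement is the Claim_ definition above) =====
theorem check_kokushi_spec : Claim_equal_check_kokushi := by
  intro cs _ _
  show check_kokushi cs = check_kokushi_alt cs
  rw [check_kokushi, kokushiLoop_eq]
  by_cases hl : cs.length < 38
  · have h37 : cs[(37:Nat)]? = none := by
      rw [List.getElem?_eq_none]; omega
    simp [check_kokushi_alt, yaoIndicesA, hl, h37]
  · have H : ∀ i : Nat, i < 38 → PySem.List.pyGet? cs (Int.ofNat i) = some (cs.getD i 0) := by
      intro i h
      rw [show (Int.ofNat i) = ((i : Nat) : Int) from rfl, PySem.List.pyGet?_natCast]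
      exact getElem?_eq_some_getD cs i (by omega)
    have hsmall : ∀ i, i ∈ yaoIndicesA → i < 38 := by decide
    have hall : (yaoIndicesA.all fun i =>
          match PySem.List.pyGet? cs (Int.ofNat i) with
          | some v => v == 1 || v == 2
          | none => false)
        = (yaoIndicesA.map fun i => cs.getD i 0).all (fun x => x == 1 || x == 2) := by
      rw [List.all_map]
      exact all_congr' _ _ _ (fun i hi => by rw [Function.comp_apply, H i (hsmall i hi)])
    have hany : (yaoIndicesA.any fun i => PySem.List.pyGet? cs (Int.ofNat i) == some 2)
        = (yaoIndicesA.map fun i => cs.getD i 0).any (fun x => x == 2) := by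
      rw [List.any_map]
      exact any_congr' _ _ _ (fun i hi => by
        rw [Function.comp_apply, H i (hsmall i hi)]
        simp)
    rw [hall, hany]
    have hcnt : ((0 : Int) + (yaoIndicesA.length : Int) == 13) = true := by decide
    rw [hcnt, Bool.and_true, Bool.false_or]
    rw [show check_kokushi_alt cs
        = (match PySem.List.min? (yaoIndicesB.map fun i => cs.getD i 0) (fun x => x),
                 PySem.List.max? (yaoIndicesB.map fun i => cs.getD i 0) (fun x => x) with
           | some mn, some mx => decide (1 ≤ mn) && mx == 2
           | _, _ => false) from by rw [check_kokushi_alt, if_neg hl]]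
    rw [show yaoIndicesB = yaoIndicesA from rfl]
    rw [show (yaoIndicesA.map fun i => cs.getD i 0)
        = cs.getD 1 0 :: [9, 11, 19, 21, 29, 31, 32, 33, 34, 35, 36, 37].map (fun i => cs.getD i 0) from rfl]
    exact kokushi_minmax _ _
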